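-- pv_equiv track=rewrite | github.com/TieuLongPhan/SynRBL | SynRBL/SynMCSImputer/MissingGraph/refinement_uncertainty.py | intersection_of_lists_with_count
-- ===== SOURCE A (Python) =====
-- from typing import List, Tuple, Optional
-- from collections import Counter
--
-- def intersection_of_lists_with_count(
--     lists: List[List[str]], intersection_num: int = 2
-- ) -> Tuple[Optional[List[str]], Optional[int]]:
--     """
--     Find lists that are present at least a specified number of times in
--     the provided list of lists and their first index.
--
--     Parameters:
--     lists (List[List[str]]): A list containing multiple lists of elements.
--     intersection_num (int): The minimum number of times a list must appear
--         to be considered.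
--
--     Returns:
--     Tuple[Optional[List[str]], Optional[int]]: The first list that meets
--         the intersection criteria and its first index, or None if no such
--         list exists.
--     """
--     # Convert inner lists to tuples for hashing and count occurrences
--     tuple_lists = [tuple(lst) for lst in lists]
--     counts = Counter(tuple_lists)
--
--     # Find the first list that meets the intersection criteria
--     for index, lst in enumerate(tuple_lists):
--         if counts[lst] >= intersection_num:
--             return list(lst), index  # Convert tuple back to list for the result
--
--     return None, None
-- ===== SOURCE B (Python) =====
-- from typing import List, Tuple, Optional
--
-- def intersection_of_lists_with_count(
--     lists: List[List[str]], intersection_num: int = 2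
-- ) -> Tuple[Optional[List[str]], Optional[int]]:
--     # Group-then-reduce: ordered dedup of the distinct values, keep the first
--     # index of each qualifying value, and answer with the MINIMUM such index
--     # (no positional scan with early return).  Correct because the first
--     # qualifying position in the list is necessarily the first occurrence of
--     # its value, hence the smallest first-index among qualifying values.
--     distinct = list(dict.fromkeys(tuple(lst) for lst in lists))
--     winners = [lists.index(list(key)) for key in distinct
--                if lists.count(list(key)) >= intersection_num]
--     if not winners:
--         return None, None
--     i = min(winners)
--     return list(lists[i]), i
-- ===== Notes on version B (the rewrite author's own statement) =====
-- stated objective: alternative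
-- what changed: Replaces A's build-a-Counter-then-positional-scan-with-early-return by a group-then-reduce strategy: ordered dedup of the distinct values, filter them by multiplicity, and return the minimum first-occurrence index among the qualifying values.
import Mathlib
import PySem

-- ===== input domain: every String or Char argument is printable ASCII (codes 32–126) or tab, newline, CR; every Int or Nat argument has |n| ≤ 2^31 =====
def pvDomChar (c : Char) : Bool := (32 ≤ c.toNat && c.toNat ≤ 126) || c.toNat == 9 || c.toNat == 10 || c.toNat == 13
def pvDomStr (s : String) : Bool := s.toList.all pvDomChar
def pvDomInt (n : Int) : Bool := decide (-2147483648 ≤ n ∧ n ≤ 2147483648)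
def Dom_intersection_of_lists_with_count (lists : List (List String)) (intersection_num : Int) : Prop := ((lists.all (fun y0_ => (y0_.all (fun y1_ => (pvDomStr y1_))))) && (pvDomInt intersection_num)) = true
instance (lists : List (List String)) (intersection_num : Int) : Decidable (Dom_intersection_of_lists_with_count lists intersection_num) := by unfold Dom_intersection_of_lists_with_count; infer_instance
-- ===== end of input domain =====

-- B replaces A's count-table-plus-positional-scan with group-then-reduce: ordered dedup of the
-- distinct values, filter by multiplicity, answer = minimum first-index among qualifying values
-- (simpler decomposition, not faster).


-- ===== PORT A =====
-- the 'for index, lst in enumerate(tuple_lists)' loop with its early return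
def pvLoopA (counts : PySem.Dict (List String) Int) (intersection_num : Int) :
    List (Int × List String) → Option (List String) × Option Int
  | [] => (none, none)
  | (index, lst) :: rest =>
    if counts.getD lst 0 ≥ intersection_num then (some lst, some index)
    else pvLoopA counts intersection_num rest

def intersection_of_lists_with_count (lists : List (List String)) (intersection_num : Int) : Option (List String) × Option Int :=
  -- tuple(lst) is the identity under the type convention (inner lists stay List String)
  let tuple_lists := lists.map (fun lst => lst)
  let counts := PySem.Dict.counter tuple_lists
  pvLoopA counts intersection_num (PySem.List.enumerate tuple_lists)

-- ===== PORT B =====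
def intersection_of_lists_with_count_alt (lists : List (List String)) (intersection_num : Int) : Option (List String) × Option Int :=
  -- list(dict.fromkeys(tuple(lst) for lst in lists)); tuple()/list() are the identity here
  let distinct := PySem.List.dedup (lists.map (fun lst => lst))
  -- lists.index(list(key)): every key of distinct is in lists, so index? is some and '.getD 0' is unreachable
  let winners := (distinct.filter
      (fun key => decide ((PySem.List.count lists key : Int) ≥ intersection_num))).map
      (fun key => (PySem.List.index? lists key).getD 0)
  if winners.isEmpty then (none, none)
  else
    let i := winners.min?.getD 0   -- min(winners); winners nonempty, so min? is some
    (some (PySem.List.pyGetD lists (i : Int) []), some (i : Int))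

-- ===== PRECONDITION & SPEC =====
def Spec_intersection_of_lists_with_count (lists : List (List String)) (intersection_num : Int) (out : Option (List String) × Option Int) : Prop := out = intersection_of_lists_with_count_alt lists intersection_num
instance (lists : List (List String)) (intersection_num : Int) (out : Option (List String) × Option Int) : Decidable (Spec_intersection_of_lists_with_count lists intersection_num out) := by unfold Spec_intersection_of_lists_with_count; infer_instance

-- ===== CLAIM (what is proved, stated in full; the proofs are below) =====
def Claim_equal_intersection_of_lists_with_count : Prop := ∀ (lists : List (List String)) (intersection_num : Int), Dom_intersection_of_lists_with_count lists intersection_num → Spec_intersection_of_lists_with_count lists intersection_num (intersection_of_lists_with_count lists intersection_num)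

-- ===== LEMMAS AND PROOFS =====
-- A's loop returns the first qualifying position, i.e. findIdx? of its predicate
theorem pvLoopA_eq_findIdx (C : PySem.Dict (List String) Int) (n : Int) :
    ∀ (xs : List (List String)) (s : Int),
    pvLoopA C n (PySem.List.enumerate xs s) =
      match xs.findIdx? (fun l => decide (C.getD l 0 ≥ n)) with
      | some k => (some (xs.getD k []), some (s + (k : Int)))
      | none => (none, none) := by
  intro xs
  induction xs with
  | nil => intro s; rfl
  | cons x xs ih =>
    intro s
    rw [PySem.List.enumerate_cons]
    simp only [pvLoopA, List.findIdx?_cons]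
    by_cases h : C.getD x 0 ≥ n
    · simp [h]
    · simp only [h, decide_eq_true_eq, if_false, ih (s + 1)]
      cases hf : xs.findIdx? (fun l => decide (C.getD l 0 ≥ n)) with
      | none => simp
      | some k =>
        simp only [Option.map_some]
        have : s + 1 + (k : Int) = s + ((k + 1 : Nat) : Int) := by push_cast; ring
        simp [this]

-- the first qualifying position is the first occurrence of its value
theorem index?_self_of_first (lists : List (List String)) (p : List String → Bool) (k : Nat)
    (hk : k < lists.length) (hpk : p lists[k] = true)
    (hmin : ∀ j (hj : j < lists.length), j < k → ¬ p lists[j] = true) :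
    PySem.List.index? lists lists[k] = some k := by
  rw [PySem.List.index?_eq_some_iff]
  refine ⟨lists.take k, lists.drop (k + 1), ?_, by simp [Nat.le_of_lt hk], ?_⟩
  · conv_lhs => rw [← List.take_append_drop k lists]
    rw [List.drop_eq_getElem_cons hk]
  · intro hmem
    rw [List.mem_take_iff_getElem] at hmem
    obtain ⟨m, hm, hget⟩ := hmem
    exact hmin m (lt_min_iff.mp hm).2 (lt_min_iff.mp hm).1 (by rw [hget]; exact hpk)

-- ===== VERDICT (by name: the statement is the Claim_ definition above) =====
theorem intersection_of_lists_with_count_spec : Claim_equal_intersection_of_lists_with_count := by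
  intro lists n _
  show intersection_of_lists_with_count lists n = intersection_of_lists_with_count_alt lists n
  simp only [intersection_of_lists_with_count, intersection_of_lists_with_count_alt, List.map_id']
  rw [pvLoopA_eq_findIdx]
  have hpred : (fun l => decide ((PySem.Dict.counter lists).getD l 0 ≥ n)) =
      (fun l => decide ((PySem.List.count lists l : Int) ≥ n)) := by
    funext l; rw [PySem.Dict.getD_counter, PySem.List.count_eq]
  rw [hpred]
  set p : List String → Bool := fun l => decide ((PySem.List.count lists l : Int) ≥ n) with hp
  cases hf : lists.findIdx? p with
  | none =>
    have hall := List.findIdx?_eq_none_iff.mp hf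
    have hfe : (PySem.List.dedup lists).filter p = [] := by
      rw [List.filter_eq_nil_iff]
      intro key hkey
      simp [hall key ((PySem.List.mem_dedup lists key).mp hkey)]
    simp only [hfe, List.map_nil, List.isEmpty_nil, if_pos]
  | some k =>
    obtain ⟨hk, hpk, hmin⟩ := List.findIdx?_eq_some_iff_getElem.mp hf
    have hidx : PySem.List.index? lists lists[k] = some k :=
      index?_self_of_first lists p k hk hpk (fun j hj hjk => hmin j hjk)
    -- k is one of the winners
    have hmem_filter : lists[k] ∈ (PySem.List.dedup lists).filter p :=
      List.mem_filter.mpr ⟨(PySem.List.mem_dedup lists _).mpr (lists.getElem_mem hk), hpk⟩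
    have hkW : k ∈ ((PySem.List.dedup lists).filter p).map
        (fun key => (PySem.List.index? lists key).getD 0) := by
      refine List.mem_map.mpr ⟨lists[k], hmem_filter, ?_⟩
      rw [hidx]; rfl
    -- every winner is ≥ k
    have hlb : ∀ w ∈ ((PySem.List.dedup lists).filter p).map
        (fun key => (PySem.List.index? lists key).getD 0), k ≤ w := by
      intro w hw
      obtain ⟨key, hkeyf, hweq⟩ := List.mem_map.mp hw
      obtain ⟨hkeyd, hkeyp⟩ := List.mem_filter.mp hkeyf
      have hkeymem : key ∈ lists := (PySem.List.mem_dedup lists key).mp hkeyd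
      obtain ⟨j, hj⟩ := Option.isSome_iff_exists.mp
        ((PySem.List.index?_isSome_iff lists key).mpr hkeymem)
      obtain ⟨hjlen, hjget, _⟩ := PySem.List.getElem_of_index?_eq_some hj
      have hpj : p lists[j] = true := by rw [hjget]; exact hkeyp
      have hge : ¬ j < k := fun hjk => hmin j hjk hpj
      rw [← hweq, hj]
      simpa using Nat.le_of_not_lt hge
    have hne : ¬ (((PySem.List.dedup lists).filter p).map
        (fun key => (PySem.List.index? lists key).getD 0)).isEmpty = true := by
      intro habs
      rw [List.isEmpty_iff] at habs
      rw [habs] at hkW; exact absurd hkW (List.not_mem_nil)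
    have hmin? : (((PySem.List.dedup lists).filter p).map
        (fun key => (PySem.List.index? lists key).getD 0)).min? = some k :=
      List.min?_eq_some_iff.mpr ⟨hkW, hlb⟩
    rw [if_neg hne, hmin?]
    simp [PySem.List.pyGetD_natCast]
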